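-- pv_equiv track=rewrite | github.com/ainfosec/FISSURE | Tools/ble_dump-master/proto.py | dewhitening
-- ===== SOURCE A (Python) =====
-- def swap_bits(value):
--     return (value * 0x0202020202  & 0x010884422010) % 1023
--
-- def dewhitening(data, channel):
--   ret = []
--   lfsr = swap_bits(channel) | 2
--
--   for d in data:
--     d = swap_bits(ord(d[:1]))
--     for i in 128, 64, 32, 16, 8, 4, 2, 1:
--       if lfsr & 0x80:
--         lfsr ^= 0x11
--         d ^= i
--
--       lfsr <<= 1
--       i >>=1
--     ret.append(swap_bits(d))
--
--   return ret
-- ===== SOURCE B (Python) =====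
-- def swap_bits(value):
--     return (value * 0x0202020202  & 0x010884422010) % 1023
--
-- def dewhitening(data, channel):
--     # pass 1: data-independent keystream of whitening bytes
--     lfsr = swap_bits(channel) | 2
--     ks = []
--     for _ in range(len(data)):
--         w = 0
--         for i in (128, 64, 32, 16, 8, 4, 2, 1):
--             if lfsr & 0x80:
--                 lfsr ^= 0x11
--                 w ^= i
--             lfsr <<= 1
--         ks.append(swap_bits(w))
--     # pass 2: xor each data byte with its keystream byte
--     return [ord(d[:1]) ^ w for d, w in zip(data, ks)]
-- ===== Notes on version B (the rewrite author's own statement) =====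
-- stated objective: alternative
-- what changed: B first generates the data-independent LFSR keystream of whitening bytes in its own pass, then XORs each data byte with swap_bits of its keystream byte in a second zip pass, using that the double 8-bit swap_bits collapses; A instead interleaves the LFSR stepping and the per-byte double-swap XOR in one nested loop.
import Mathlib
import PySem

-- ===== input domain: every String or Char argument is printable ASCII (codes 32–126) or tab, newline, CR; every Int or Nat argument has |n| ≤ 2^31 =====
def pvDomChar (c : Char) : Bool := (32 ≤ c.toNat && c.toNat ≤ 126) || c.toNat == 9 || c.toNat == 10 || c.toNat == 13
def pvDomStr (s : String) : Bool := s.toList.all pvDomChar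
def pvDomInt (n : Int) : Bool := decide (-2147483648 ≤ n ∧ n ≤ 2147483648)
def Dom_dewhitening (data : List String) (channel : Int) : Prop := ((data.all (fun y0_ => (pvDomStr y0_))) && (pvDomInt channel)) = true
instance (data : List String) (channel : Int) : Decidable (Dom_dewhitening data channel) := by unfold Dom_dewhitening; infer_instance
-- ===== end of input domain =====

-- B separates the data-independent LFSR keystream generation from the data XOR
-- (two passes, using that the double bit-swap collapses), instead of A's
-- interleaved per-byte loop; same results, similar cost (objective: alternative).

-- ===== PORT A =====
-- swap_bits, shared verbatim by both Python versions
def swapBits (v : Int) : Int := PySem.Int.mod (PySem.Int.band (v * 0x0202020202) 0x010884422010) 1023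

-- ord(d[:1]); Python raises TypeError on "", which Pre_ excludes (0 is never reached under Pre_)
def pyOrd1 (s : String) : Int :=
  match s.toList with
  | c :: _ => (c.toNat : Int)
  | [] => 0

def masksA : List Int := [128, 64, 32, 16, 8, 4, 2, 1]

-- one iteration of A's inner 8-step loop on state (lfsr, d); 'i >>= 1' only rebinds the loop variable
def stepA (st : Int × Int) (i : Int) : Int × Int :=
  let st' := if PySem.Int.band st.1 0x80 ≠ 0 then (PySem.Int.bxor st.1 0x11, PySem.Int.bxor st.2 i) else st
  (st'.1 <<< 1, st'.2)

def dewhitening (data : List String) (channel : Int) : List Int :=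
  (data.foldl (fun (acc : List Int × Int) d =>
      let st := masksA.foldl stepA (acc.2, swapBits (pyOrd1 d))
      (acc.1 ++ [swapBits st.2], st.1))
    ([], PySem.Int.bor (swapBits channel) 2)).1

-- ===== PORT B =====
def masksB : List Int := [128, 64, 32, 16, 8, 4, 2, 1]

-- one iteration of B's inner loop on state (lfsr, w): the mask bit goes into the whitening byte w
def stepB (st : Int × Int) (i : Int) : Int × Int :=
  let st' := if PySem.Int.band st.1 0x80 ≠ 0 then (PySem.Int.bxor st.1 0x11, PySem.Int.bxor st.2 i) else st
  (st'.1 <<< 1, st'.2)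

-- pass 1 of B: the data-independent keystream (one swap_bits(w) per output position)
def keystream (lfsr : Int) : Nat → List Int
  | 0 => []
  | n + 1 =>
    let st := masksB.foldl stepB (lfsr, 0)
    swapBits st.2 :: keystream st.1 n

def dewhitening_alt (data : List String) (channel : Int) : List Int :=
  let ks := keystream (PySem.Int.bor (swapBits channel) 2) data.length
  (data.zip ks).map (fun p => PySem.Int.bxor (pyOrd1 p.1) p.2)

-- ===== PRECONDITION & SPEC =====
-- Pre_ excludes inputs containing an empty string, on which A (ord('')) raises TypeError.
def Pre_dewhitening (data : List String) (channel : Int) : Prop := ∀ s ∈ data, s ≠ ""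
instance (data : List String) (channel : Int) : Decidable (Pre_dewhitening data channel) := by unfold Pre_dewhitening; infer_instance
def pvWitness_dewhitening : List String × Int := (["Az", "!"], 17)

def Spec_dewhitening (data : List String) (channel : Int) (out : List Int) : Prop := out = dewhitening_alt data channel
instance (data : List String) (channel : Int) (out : List Int) : Decidable (Spec_dewhitening data channel out) := by unfold Spec_dewhitening; infer_instance

-- ===== CLAIM (what is proved, stated in full; the proofs are below) =====
def Claim_equal_dewhitening : Prop := ∀ (data : List String) (channel : Int), Dom_dewhitening data channel → Pre_dewhitening data channel → Spec_dewhitening data channel (dewhitening data channel)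

-- ===== LEMMAS AND PROOFS =====

-- proof-only helper: explicit reversal of the low 8 bits
def rev8 (n : Nat) : Nat :=
  ((n &&& 1) <<< 7) ||| (((n >>> 1) &&& 1) <<< 6) ||| (((n >>> 2) &&& 1) <<< 5) ||| (((n >>> 3) &&& 1) <<< 4) |||
  (((n >>> 4) &&& 1) <<< 3) ||| (((n >>> 5) &&& 1) <<< 2) ||| (((n >>> 6) &&& 1) <<< 1) ||| ((n >>> 7) &&& 1)

set_option maxRecDepth 10000 in
theorem swapBits_eq_rev8 : ∀ m : Nat, m < 256 → swapBits (m : Int) = (rev8 m : Int) := by decide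

set_option maxRecDepth 10000 in
set_option maxHeartbeats 2000000 in
theorem rev8_xor : ∀ m : Nat, m < 256 → ∀ k : Nat, k < 256 → rev8 (m ^^^ k) = rev8 m ^^^ rev8 k := by decide

set_option maxRecDepth 10000 in
theorem rev8_rev8 : ∀ m : Nat, m < 256 → rev8 (rev8 m) = m := by decide

set_option maxRecDepth 10000 in
theorem rev8_lt : ∀ m : Nat, m < 256 → rev8 m < 256 := by decide

theorem pybxor_assoc_nonneg (a b c : Int) (ha : 0 ≤ a) (hb : 0 ≤ b) (hc : 0 ≤ c) :
    PySem.Int.bxor (PySem.Int.bxor a b) c = PySem.Int.bxor a (PySem.Int.bxor b c) := by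
  obtain ⟨m, rfl⟩ := Int.eq_ofNat_of_zero_le ha
  obtain ⟨n, rfl⟩ := Int.eq_ofNat_of_zero_le hb
  obtain ⟨p, rfl⟩ := Int.eq_ofNat_of_zero_le hc
  simp [Nat.xor_assoc]

-- B's inner loop tracks A's: XORing the data byte inside the loop (A) equals
-- collecting the mask bits into w (B) and XORing afterwards.
theorem step_sync : ∀ (is : List Int), (∀ i ∈ is, 0 ≤ i) → ∀ (l d0 w : Int), 0 ≤ d0 → 0 ≤ w →
    is.foldl stepA (l, PySem.Int.bxor d0 w) =
      ((is.foldl stepB (l, w)).1, PySem.Int.bxor d0 (is.foldl stepB (l, w)).2) := by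
  intro is
  induction is with
  | nil => intro _ l d0 w _ _; simp
  | cons i rest ih =>
    intro hnn l d0 w hd hw
    have hi : 0 ≤ i := hnn i (by simp)
    have hrest : ∀ j ∈ rest, 0 ≤ j := fun j hj => hnn j (by simp [hj])
    by_cases hb : PySem.Int.band l 0x80 ≠ 0
    · simp only [List.foldl_cons, stepA, stepB, if_pos hb]
      rw [pybxor_assoc_nonneg d0 w i hd hw hi]
      exact ih hrest _ d0 _ hd (by
        obtain ⟨n, rfl⟩ := Int.eq_ofNat_of_zero_le hw
        obtain ⟨p, rfl⟩ := Int.eq_ofNat_of_zero_le hi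
        simp)
    · simp only [List.foldl_cons, stepA, stepB, if_neg hb]
      exact ih hrest _ d0 w hd hw

-- the whitening byte stays a Nat below 256 throughout B's inner loop
theorem stepB_w_bound : ∀ (is : List Int), (∀ i ∈ is, ∃ m : Nat, i = (m : Int) ∧ m < 256) →
    ∀ (l w : Int), (∃ k : Nat, w = (k : Int) ∧ k < 256) →
    ∃ k : Nat, (is.foldl stepB (l, w)).2 = (k : Int) ∧ k < 256 := by
  intro is
  induction is with
  | nil => intro _ l w hw; simpa using hw
  | cons i rest ih =>
    intro hm l w hw
    obtain ⟨mi, rfl, hmi⟩ := hm i (by simp)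
    obtain ⟨k, rfl, hk⟩ := hw
    have hrest : ∀ j ∈ rest, ∃ m : Nat, j = (m : Int) ∧ m < 256 := fun j hj => hm j (by simp [hj])
    by_cases hb : PySem.Int.band l 0x80 ≠ 0
    · simp only [List.foldl_cons, stepB, if_pos hb]
      exact ih hrest _ _ ⟨k ^^^ mi, by simp, Nat.xor_lt_two_pow (n := 8) hk hmi⟩
    · simp only [List.foldl_cons, stepB, if_neg hb]
      exact ih hrest _ _ ⟨k, rfl, hk⟩

-- the double swap_bits collapses: swap(swap(b) ^ w) = b ^ swap(w) for bytes
theorem swap_collapse (b k : Nat) (hb : b < 256) (hk : k < 256) :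
    swapBits (PySem.Int.bxor (swapBits (b : Int)) (k : Int)) =
      PySem.Int.bxor (b : Int) (swapBits (k : Int)) := by
  rw [swapBits_eq_rev8 b hb, swapBits_eq_rev8 k hk]
  have h1 : PySem.Int.bxor ((rev8 b : Nat) : Int) (k : Int) = ((rev8 b ^^^ k : Nat) : Int) := by simp
  rw [h1, swapBits_eq_rev8 _ (Nat.xor_lt_two_pow (n := 8) (rev8_lt b hb) hk),
      rev8_xor _ (rev8_lt b hb) _ hk, rev8_rev8 b hb]
  simp

theorem pyOrd1_byte (s : String) (hs : pvDomStr s = true) (hne : s ≠ "") :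
    ∃ b : Nat, pyOrd1 s = (b : Int) ∧ b < 256 := by
  unfold pyOrd1
  cases h : s.toList with
  | nil =>
    exfalso
    apply hne
    have h2 := congrArg String.ofList h
    rwa [String.ofList_toList] at h2
  | cons c rest =>
    refine ⟨c.toNat, rfl, ?_⟩
    have : pvDomChar c = true := by
      have := hs; unfold pvDomStr at this
      rw [h] at this; simp [List.all_cons] at this; exact this.1
    unfold pvDomChar at this
    simp only [Bool.or_eq_true, Bool.and_eq_true, decide_eq_true_eq, beq_iff_eq] at this
    omega

theorem masks_nonneg : ∀ i ∈ masksA, 0 ≤ i := by decide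
theorem masks_bytes : ∀ i ∈ masksB, ∃ m : Nat, i = (m : Int) ∧ m < 256 := by
  intro i hi
  fin_cases hi
  · exact ⟨128, by norm_num, by norm_num⟩
  · exact ⟨64, by norm_num, by norm_num⟩
  · exact ⟨32, by norm_num, by norm_num⟩
  · exact ⟨16, by norm_num, by norm_num⟩
  · exact ⟨8, by norm_num, by norm_num⟩
  · exact ⟨4, by norm_num, by norm_num⟩
  · exact ⟨2, by norm_num, by norm_num⟩
  · exact ⟨1, by norm_num, by norm_num⟩

theorem masksA_eq_masksB : masksA = masksB := rfl

theorem main_fold : ∀ (data : List String) (lfsr : Int) (acc : List Int),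
    (∀ s ∈ data, pvDomStr s = true) → (∀ s ∈ data, s ≠ "") →
    (data.foldl (fun (acc : List Int × Int) d =>
        let st := masksA.foldl stepA (acc.2, swapBits (pyOrd1 d))
        (acc.1 ++ [swapBits st.2], st.1)) (acc, lfsr)).1 =
      acc ++ (data.zip (keystream lfsr data.length)).map (fun p => PySem.Int.bxor (pyOrd1 p.1) p.2) := by
  intro data
  induction data with
  | nil => intro lfsr acc _ _; simp [keystream]
  | cons d rest ih =>
    intro lfsr acc hdom hne
    obtain ⟨b, hb, hblt⟩ := pyOrd1_byte d (hdom d (by simp)) (hne d (by simp))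
    have hd0 : 0 ≤ swapBits (pyOrd1 d) := PySem.Int.mod_nonneg _ (by norm_num)
    have hsync := step_sync masksA masks_nonneg lfsr (swapBits (pyOrd1 d)) 0 hd0 le_rfl
    obtain ⟨k, hk, hklt⟩ := stepB_w_bound masksB masks_bytes lfsr 0 ⟨0, by simp, by omega⟩
    simp only [List.foldl_cons]
    rw [show (PySem.Int.bxor (swapBits (pyOrd1 d)) 0) = swapBits (pyOrd1 d) from PySem.Int.bxor_zero _] at hsync
    rw [hsync, masksA_eq_masksB] at *
    rw [ih _ _ (fun s hs => hdom s (by simp [hs])) (fun s hs => hne s (by simp [hs]))]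
    have hcol : swapBits (PySem.Int.bxor (swapBits (pyOrd1 d)) ((masksB.foldl stepB (lfsr, 0)).2)) =
        PySem.Int.bxor (pyOrd1 d) (swapBits ((masksB.foldl stepB (lfsr, 0)).2)) := by
      rw [hb, hk]; exact swap_collapse b k hblt hklt
    simp only [keystream, List.length_cons, List.zip_cons_cons, List.map_cons, hcol]
    simp

-- ===== VERDICT (by name: the statement is the Claim_ definition above) =====
theorem dewhitening_spec : Claim_equal_dewhitening := by
  unfold Claim_equal_dewhitening
  intro data channel hdom hpre
  unfold Spec_dewhitening dewhitening dewhitening_alt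
  have hdom' : ∀ s ∈ data, pvDomStr s = true := by
    unfold Dom_dewhitening at hdom
    simp only [Bool.and_eq_true, List.all_eq_true] at hdom
    exact fun s hs => hdom.1 s hs
  simpa using main_fold data (PySem.Int.bor (swapBits channel) 2) [] hdom' hpre
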